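-- pv_equiv track=rewrite | github.com/creditimpact/finance-project-2-0 | backend/core/logic/report_analysis/keys.py | normalize_issuer
-- ===== SOURCE A (Python) =====
-- def normalize_issuer(name: str) -> str:
--     """Normalize issuer names by removing basic punctuation and collapsing spaces."""
--     if not name:
--         return ""
--     cleaned = name.replace(".", " ").replace("-", " ").replace("/", " ")
--     tokens = cleaned.split()
--     collapsed: list[str] = []
--     i = 0
--     while i < len(tokens):
--         if len(tokens[i]) == 1:
--             letters: list[str] = []
--             while i < len(tokens) and len(tokens[i]) == 1:
--                 letters.append(tokens[i])
--                 i += 1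
--             collapsed.append("".join(letters))
--         else:
--             collapsed.append(tokens[i])
--             i += 1
--     return " ".join(collapsed).upper().strip()
-- ===== SOURCE B (Python) =====
-- def normalize_issuer(name: str) -> str:
--     """Normalize issuer names by removing basic punctuation and collapsing spaces."""
--     if not name:
--         return ""
--     tokens = name.replace(".", " ").replace("-", " ").replace("/", " ").split()
--     # Instead of grouping runs of single-letter tokens, decide each SEPARATOR
--     # pairwise: adjacent tokens are glued with no space exactly when both are
--     # single characters, otherwise with one space.
--     parts: list[str] = []
--     for cur, nxt in zip(tokens, tokens[1:]):
--         parts.append(cur)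
--         parts.append("" if len(cur) == 1 and len(nxt) == 1 else " ")
--     if tokens:
--         parts.append(tokens[-1])
--     return "".join(parts).upper().strip()
-- ===== Notes on version B (the rewrite author's own statement) =====
-- stated objective: alternative
-- what changed: Instead of grouping runs of single-character tokens and joining the groups with spaces, B zips each token with its successor and chooses the separator pairwise (empty iff both neighbours are single characters), so no run is ever collected.
import Mathlib
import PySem

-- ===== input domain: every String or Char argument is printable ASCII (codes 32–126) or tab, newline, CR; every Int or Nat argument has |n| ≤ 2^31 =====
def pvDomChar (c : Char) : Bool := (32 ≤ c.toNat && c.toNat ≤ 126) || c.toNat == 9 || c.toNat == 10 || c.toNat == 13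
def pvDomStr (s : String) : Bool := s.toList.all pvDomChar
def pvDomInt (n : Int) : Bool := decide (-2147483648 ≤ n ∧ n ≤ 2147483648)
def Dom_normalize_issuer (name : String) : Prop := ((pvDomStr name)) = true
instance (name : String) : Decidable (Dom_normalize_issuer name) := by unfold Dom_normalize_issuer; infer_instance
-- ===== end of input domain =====

-- B replaces A's run-collecting while loop by a pairwise-separator rule: zip each token with
-- its successor and glue the pair with no space exactly when both are single characters
-- (alternative decomposition; same cost).

-- ===== PORT A =====
def pvGrabA (ts : List (List Char)) : List (List Char) × List (List Char) :=
  match ts with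
  | [] => ([], [])
  | t :: rest =>
    if t.length = 1 then
      let p := pvGrabA rest
      (t :: p.1, p.2)
    else ([], t :: rest)

theorem pvGrabA_snd_length_le (ts : List (List Char)) : (pvGrabA ts).2.length ≤ ts.length := by
  induction ts with
  | nil => simp [pvGrabA]
  | cons t rest ih =>
    by_cases h : t.length = 1 <;> simp [pvGrabA, h]
    omega

def pvLoopA (ts : List (List Char)) : List (List Char) :=
  match ts with
  | [] => []
  | t :: rest =>
    if t.length = 1 then
      let p := pvGrabA (t :: rest)
      PySem.Chars.join [] p.1 :: pvLoopA p.2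
    else t :: pvLoopA rest
termination_by ts.length
decreasing_by
  · simp only [pvGrabA, *, if_pos]
    have := pvGrabA_snd_length_le rest
    simp only [List.length_cons]; omega
  · simp

def normalize_issuer (name : String) : String :=
  if name = "" then ""
  else
    let cleaned := PySem.Chars.replace (PySem.Chars.replace (PySem.Chars.replace name.toList ['.'] [' ']) ['-'] [' ']) ['/'] [' ']
    let tokens := PySem.Chars.split₀ cleaned
    let collapsed := pvLoopA tokens
    String.ofList (PySem.Chars.strip (PySem.Chars.upper (PySem.Chars.join [' '] collapsed)))

-- ===== PORT B =====
-- for cur, nxt in zip(tokens, tokens[1:]): parts += [cur, sep]; then the last token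
def pvPartsB (tokens : List (List Char)) : List (List Char) :=
  (tokens.zip tokens.tail).flatMap
    (fun p => [p.1, if p.1.length = 1 ∧ p.2.length = 1 then [] else [' ']])
  ++ (match tokens.getLast? with | some t => [t] | none => [])

def normalize_issuer_alt (name : String) : String :=
  if name = "" then ""
  else
    let tokens := PySem.Chars.split₀
      (PySem.Chars.replace (PySem.Chars.replace (PySem.Chars.replace name.toList ['.'] [' ']) ['-'] [' ']) ['/'] [' '])
    String.ofList (PySem.Chars.strip (PySem.Chars.upper (PySem.Chars.join [] (pvPartsB tokens))))

-- ===== PRECONDITION & SPEC =====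
def Spec_normalize_issuer (name : String) (out : String) : Prop := out = normalize_issuer_alt name
instance (name : String) (out : String) : Decidable (Spec_normalize_issuer name out) := by unfold Spec_normalize_issuer; infer_instance

-- ===== CLAIM (what is proved, stated in full; the proofs are below) =====
def Claim_equal_normalize_issuer : Prop := ∀ (name : String), Dom_normalize_issuer name → Spec_normalize_issuer name (normalize_issuer name)

-- ===== LEMMAS AND PROOFS =====

-- common reference form: the joined string, computed by structural recursion on the token list
def pvJoinRef : List (List Char) → List Char
  | [] => []
  | [t] => t
  | t :: n :: rest => t ++ (if t.length = 1 ∧ n.length = 1 then [] else [' ']) ++ pvJoinRef (n :: rest)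

theorem pv_join_nil_cons (a : List Char) (l : List (List Char)) :
    PySem.Chars.join [] (a :: l) = a ++ PySem.Chars.join [] l := by
  cases l with
  | nil => simp [PySem.Chars.join_singleton, PySem.Chars.join_nil]
  | cons b l' => rw [PySem.Chars.join_cons_cons]; simp

theorem pv_join_append_head (sep a b : List Char) (l : List (List Char)) :
    PySem.Chars.join sep ((a ++ b) :: l) = a ++ PySem.Chars.join sep (b :: l) := by
  cases l with
  | nil => simp [PySem.Chars.join_singleton]
  | cons c l' => rw [PySem.Chars.join_cons_cons, PySem.Chars.join_cons_cons]; simp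

theorem pvPartsB_eq_ref (ts : List (List Char)) :
    PySem.Chars.join [] (pvPartsB ts) = pvJoinRef ts := by
  induction ts with
  | nil => simp [pvPartsB, pvJoinRef, PySem.Chars.join_nil]
  | cons t rest ih =>
    cases rest with
    | nil => simp [pvPartsB, pvJoinRef, PySem.Chars.join_singleton]
    | cons n rest' =>
      have h : pvPartsB (t :: n :: rest') =
          t :: (if t.length = 1 ∧ n.length = 1 then [] else [' ']) :: pvPartsB (n :: rest') := by
        simp [pvPartsB]
      rw [h, pv_join_nil_cons, pv_join_nil_cons, ih, pvJoinRef]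
      simp

theorem pvLoopA_ne_nil (ts : List (List Char)) (h : ts ≠ []) : pvLoopA ts ≠ [] := by
  cases ts with
  | nil => exact absurd rfl h
  | cons t rest =>
    rw [pvLoopA]
    by_cases h1 : t.length = 1 <;> simp [h1]

theorem pvLoopA_eq_ref (ts : List (List Char)) :
    PySem.Chars.join [' '] (pvLoopA ts) = pvJoinRef ts := by
  induction hn : ts.length using Nat.strong_induction_on generalizing ts with
  | _ N ih =>
  match ts with
  | [] => simp [pvLoopA, pvJoinRef, PySem.Chars.join_nil]
  | [t] =>
    rw [pvLoopA]
    by_cases h1 : t.length = 1 <;>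
      simp [h1, pvGrabA, pvLoopA, pvJoinRef, PySem.Chars.join_singleton]
  | t :: n :: rest =>
    have hlen : (n :: rest).length < N := by subst hn; simp
    by_cases h1 : t.length = 1
    · by_cases h2 : n.length = 1
      · -- t and n both single: loop on t::n::rest prepends t (no space) to loop on n::rest
        have hA : pvLoopA (t :: n :: rest) =
            (t ++ PySem.Chars.join [] (n :: (pvGrabA rest).1)) :: pvLoopA (pvGrabA rest).2 := by
          rw [pvLoopA]
          simp [h1, h2, pvGrabA, pv_join_nil_cons]
        have hA' : pvLoopA (n :: rest) =
            PySem.Chars.join [] (n :: (pvGrabA rest).1) :: pvLoopA (pvGrabA rest).2 := by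
          rw [pvLoopA]
          simp [h2, pvGrabA]
        rw [hA, pv_join_append_head, ← hA', ih _ hlen _ rfl, pvJoinRef]
        simp [h1, h2]
      · -- t single, n not: the run stops at t, a space follows
        have hA : pvLoopA (t :: n :: rest) = t :: pvLoopA (n :: rest) := by
          rw [pvLoopA]
          simp [h1, h2, pvGrabA, PySem.Chars.join_singleton]
        obtain ⟨b, l, hL⟩ : ∃ b l, pvLoopA (n :: rest) = b :: l := by
          cases hL : pvLoopA (n :: rest) with
          | nil => exact absurd hL (pvLoopA_ne_nil _ (by simp))
          | cons b l => exact ⟨b, l, rfl⟩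
        rw [hA, hL, PySem.Chars.join_cons_cons, ← hL, ih _ hlen _ rfl, pvJoinRef]
        simp [h2]
    · have hA : pvLoopA (t :: n :: rest) = t :: pvLoopA (n :: rest) := by
        rw [pvLoopA]; simp [h1]
      obtain ⟨b, l, hL⟩ : ∃ b l, pvLoopA (n :: rest) = b :: l := by
        cases hL : pvLoopA (n :: rest) with
        | nil => exact absurd hL (pvLoopA_ne_nil _ (by simp))
        | cons b l => exact ⟨b, l, rfl⟩
      rw [hA, hL, PySem.Chars.join_cons_cons, ← hL, ih _ hlen _ rfl, pvJoinRef]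
      simp [h1]

-- ===== VERDICT (by name: the statement is the Claim_ definition above) =====
theorem normalize_issuer_spec : Claim_equal_normalize_issuer := by
  intro name _
  unfold Spec_normalize_issuer normalize_issuer normalize_issuer_alt
  by_cases h : name = ""
  · simp [h]
  · simp only [h, ite_false]
    rw [pvLoopA_eq_ref, ← pvPartsB_eq_ref]
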